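-- pv_equiv track=rewrite | github.com/FernandooMarinn/Patrician_III_Tribute | Functionalities/Utilities.py | add_dots
-- ===== SOURCE A (Python) =====
-- def add_dots(number):
--     """
--     Used to improve the experience when the numbers (coins) are high. It adds a dot every 3 digits of a number
--     :param number:
--     :return:
--     """
--     #  Changing the number to a reversed list
--     listed_number = list(reversed(str(number)))
--     #  Setting a counter and creating a final number variable.
--     counter = 0
--     final_number = []
--     #  Creating a loop for iterating the number.
--     for i in range(len(listed_number)):
--         # Every 3 digits we append a dot.
--         if counter == 3:
--             counter = 1
--             final_number.append(".")
--         else: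
--             counter += 1
--         final_number.append(listed_number[i])
--
--     #  We make another reversed list, to get the original number, plus the dots.
--     final_number = list(reversed(final_number))
--     #  At last, we create a new str adding all digits of the final number
--     number_with_dots = "".join(final_number)
--     return number_with_dots
-- ===== SOURCE B (Python) =====
-- def add_dots(number):
--     s = str(number)
--     chunks = []
--     while len(s) > 3:
--         chunks.append(s[-3:])
--         s = s[:-3]
--     chunks.append(s)
--     return ".".join(reversed(chunks))
-- ===== Notes on version B (the rewrite author's own statement) =====
-- stated objective: simpler
-- what changed: B replaces A's per-character walk over the reversed digit list with a reset counter by a while loop that repeatedly slices the last three characters off str(number) and joins the reversed chunk list with '.', reproducing A's sign handling (the '-' is absorbed into the leftmost 3-character group) by chunking on raw character count.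
import Mathlib
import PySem

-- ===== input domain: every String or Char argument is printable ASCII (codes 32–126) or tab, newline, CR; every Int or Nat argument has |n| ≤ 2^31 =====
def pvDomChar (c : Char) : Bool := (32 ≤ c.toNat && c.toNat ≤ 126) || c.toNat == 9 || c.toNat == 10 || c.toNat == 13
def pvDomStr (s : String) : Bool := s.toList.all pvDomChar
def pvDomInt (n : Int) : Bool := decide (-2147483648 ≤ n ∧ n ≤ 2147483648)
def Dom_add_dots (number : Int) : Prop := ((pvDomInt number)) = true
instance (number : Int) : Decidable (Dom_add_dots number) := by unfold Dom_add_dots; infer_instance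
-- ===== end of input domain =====

-- B groups str(number) into 3-character slices from the right and joins them with '.' — a different
-- decomposition (slice chunking) than A's per-character walk with a reset counter; same cost, simpler code.

-- ===== PORT A =====
-- one loop step of A: 'if counter == 3: counter = 1; append "."; else counter += 1; append char'
def addDotsStep (st : Int × List Char) (c : Char) : Int × List Char :=
  if st.1 == 3 then (1, (st.2 ++ ['.']) ++ [c]) else (st.1 + 1, st.2 ++ [c])

def add_dots (number : Int) : String :=
  String.ofList (((PySem.Int.toChars number).reverse.foldl addDotsStep (0, [])).2.reverse)

-- ===== PORT B =====
-- the while loop: peel s[-3:] off while len(s) > 3, collecting the chunks; then the remaining prefix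
def bChunks (l : List Char) : List (List Char) :=
  if l.length > 3 then l.drop (l.length - 3) :: bChunks (l.take (l.length - 3)) else [l]
termination_by l.length
decreasing_by simp_all; omega

def add_dots_alt (number : Int) : String :=
  String.ofList (PySem.Chars.join ['.'] (bChunks (PySem.Int.toChars number)).reverse)

-- ===== PRECONDITION & SPEC =====
def Spec_add_dots (number : Int) (out : String) : Prop := out = add_dots_alt number
instance (number : Int) (out : String) : Decidable (Spec_add_dots number out) := by unfold Spec_add_dots; infer_instance

-- ===== CLAIM (what is proved, stated in full; the proofs are below) =====
def Claim_equal_add_dots : Prop := ∀ (number : Int), Dom_add_dots number → Spec_add_dots number (add_dots number)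

-- ===== LEMMAS AND PROOFS =====

-- the left-to-right grouping of the reversed string that A's counter loop realises
def groups3 (r : List Char) : List (List Char) :=
  if r.length > 3 then r.take 3 :: groups3 (r.drop 3) else [r]
termination_by r.length
decreasing_by simp_all; omega

lemma groups3_ne_nil (r : List Char) : groups3 r ≠ [] := by
  unfold groups3; split <;> simp

lemma bChunks_eq_groups3 (l : List Char) :
    bChunks l = (groups3 l.reverse).map List.reverse := by
  by_cases h : l.length > 3
  · rw [bChunks, groups3]
    simp only [List.length_reverse, h, if_pos]
    rw [List.take_reverse, List.drop_reverse]
    have := bChunks_eq_groups3 (l.take (l.length - 3))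
    simp only [List.map_cons, List.reverse_reverse]
    rw [this]
  · rw [bChunks, groups3, if_neg (by simpa using h), if_neg (by simpa using h)]
    simp
termination_by l.length
decreasing_by simp_all; omega

-- while the counter stays below 3, A's loop only appends the characters
lemma foldl_step_low (r : List Char) : ∀ (c : Int) (acc : List Char),
    0 ≤ c → c + r.length ≤ 3 →
    r.foldl addDotsStep (c, acc) = (c + r.length, acc ++ r) := by
  induction r with
  | nil => intro c acc _ _; simp
  | cons x t ih =>
    intro c acc h0 h3
    simp only [List.foldl_cons, addDotsStep]
    have hne : (c == 3) = false := by
      simp only [List.length_cons] at h3; simp; omega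
    rw [hne]
    simp only [Bool.false_eq_true, if_false]
    rw [ih (c + 1) (acc ++ [x]) (by omega) (by simp at h3 ⊢; omega)]
    simp; omega

-- a saturated counter behaves like a fresh counter with a dot already emitted
lemma foldl_step_sat (r : List Char) (acc : List Char) (hr : r ≠ []) :
    r.foldl addDotsStep (3, acc) = r.foldl addDotsStep (0, acc ++ ['.']) := by
  cases r with
  | nil => exact absurd rfl hr
  | cons x t => simp [addDotsStep]

-- characterisation of A's loop: it writes the groups of three joined by dots
lemma foldl_step_groups (r : List Char) : ∀ acc : List Char,
    (r.foldl addDotsStep (0, acc)).2 = acc ++ PySem.Chars.join ['.'] (groups3 r) := by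
  intro acc
  by_cases h : r.length > 3
  · have hsplit : r = r.take 3 ++ r.drop 3 := (List.take_append_drop 3 r).symm
    have hlen3 : (r.take 3).length = 3 := by simp; omega
    conv_lhs => rw [hsplit]
    rw [List.foldl_append]
    rw [foldl_step_low (r.take 3) 0 acc (le_refl 0) (by simp [hlen3])]
    rw [hlen3]
    norm_num
    rw [foldl_step_sat (r.drop 3) _ (by intro hn; have := congrArg List.length hn; simp at this; omega)]
    rw [foldl_step_groups (r.drop 3) (acc ++ r.take 3 ++ ['.'])]
    conv_rhs => rw [groups3]
    rw [if_pos h]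
    obtain ⟨g, gs, hg⟩ : ∃ g gs, groups3 (r.drop 3) = g :: gs := by
      cases hgs : groups3 (r.drop 3) with
      | nil => exact absurd hgs (groups3_ne_nil _)
      | cons g gs => exact ⟨g, gs, rfl⟩
    rw [hg, PySem.Chars.join_cons_cons]
    simp
  · rw [foldl_step_low r 0 acc (le_refl 0) (by omega)]
    rw [groups3, if_neg h, PySem.Chars.join_singleton]
termination_by r.length
decreasing_by simp only [List.length_drop]; omega

-- join with a one-char separator appended on the right
lemma join_append_singleton (L : List (List Char)) (x : List Char) (hL : L ≠ []) :
    PySem.Chars.join ['.'] (L ++ [x]) = PySem.Chars.join ['.'] L ++ ['.'] ++ x := by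
  induction L with
  | nil => exact absurd rfl hL
  | cons a t ih =>
    cases t with
    | nil => simp [PySem.Chars.join_singleton, PySem.Chars.join_cons_cons]
    | cons b u =>
      simp only [List.cons_append] at ih ⊢
      rw [PySem.Chars.join_cons_cons, PySem.Chars.join_cons_cons, ih (by simp)]
      simp

-- reversing a dot-join reverses the pieces and their order
lemma join_reverse (L : List (List Char)) :
    (PySem.Chars.join ['.'] L).reverse
      = PySem.Chars.join ['.'] ((L.map List.reverse).reverse) := by
  induction L with
  | nil => simp [PySem.Chars.join_nil]
  | cons a t ih =>
    cases t with
    | nil => simp [PySem.Chars.join_singleton]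
    | cons b u =>
      rw [PySem.Chars.join_cons_cons]
      simp only [List.map_cons, List.reverse_cons]
      rw [join_append_singleton _ _ (by simp)]
      rw [← List.reverse_cons, ← List.map_cons]
      rw [← ih]
      simp

-- ===== VERDICT (by name: the statement is the Claim_ definition above) =====
theorem add_dots_spec : Claim_equal_add_dots := by
  intro number _
  show add_dots number = add_dots_alt number
  unfold add_dots add_dots_alt
  rw [foldl_step_groups ((PySem.Int.toChars number).reverse) []]
  rw [List.nil_append, join_reverse]
  rw [bChunks_eq_groups3]
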